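-- pv_equiv track=rewrite | github.com/nhomyk/AgenticQA | AgenticQA/src/agenticqa/rag/hybrid_retriever.py | _is_structured_query
-- ===== SOURCE A (Python) =====
-- def _is_structured_query(query: str) -> bool:
--     """Detect if query is for structured data"""
--     structured_keywords = [
--         'coverage', 'percent', 'rate', 'count', 'total',
--         'average', 'metric', 'statistics', 'trend',
--         'how many', 'what is the', 'latest', 'recent'
--     ]
--     query_lower = query.lower()
--     return any(keyword in query_lower for keyword in structured_keywords)
-- ===== SOURCE B (Python) =====
-- def _is_structured_query(query: str) -> bool:
--     """Detect if query is for structured data"""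
--     structured_keywords = [
--         'coverage', 'percent', 'rate', 'count', 'total',
--         'average', 'metric', 'statistics', 'trend',
--         'how many', 'what is the', 'latest', 'recent'
--     ]
--     query_lower = query.lower()
--     # single left-to-right scan: at each position, does some keyword start here?
--     return any(query_lower.startswith(k, i)
--                for i in range(len(query_lower) + 1)
--                for k in structured_keywords)
-- ===== Notes on version B (the rewrite author's own statement) =====
-- stated objective: alternative
-- what changed: Replaces the keyword-major loop of independent substring tests ('k in q' per keyword) with a single position-major left-to-right scan of the lowered query that checks at every position whether any keyword starts there.
import Mathlib
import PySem

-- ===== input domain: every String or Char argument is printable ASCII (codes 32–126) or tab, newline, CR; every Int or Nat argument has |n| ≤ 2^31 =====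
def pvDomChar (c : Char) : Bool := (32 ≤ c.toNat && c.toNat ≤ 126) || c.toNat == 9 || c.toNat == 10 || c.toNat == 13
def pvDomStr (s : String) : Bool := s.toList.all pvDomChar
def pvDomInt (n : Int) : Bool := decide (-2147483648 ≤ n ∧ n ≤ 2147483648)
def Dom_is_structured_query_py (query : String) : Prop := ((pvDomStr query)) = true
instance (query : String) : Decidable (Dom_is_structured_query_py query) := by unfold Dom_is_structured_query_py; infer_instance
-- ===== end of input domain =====

-- B replaces the per-keyword substring-membership loop with a single position-major
-- left-to-right scan of the lowered query (alternative decomposition, same cost).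

-- ===== PORT A =====
def pvKeywords : List String :=
  ["coverage", "percent", "rate", "count", "total",
   "average", "metric", "statistics", "trend",
   "how many", "what is the", "latest", "recent"]

def is_structured_query_py (query : String) : Bool :=
  let query_lower := PySem.Str.lower query
  pvKeywords.any (fun keyword => PySem.Str.isIn keyword query_lower)

-- ===== PORT B =====
def pvKeywordChars : List (List Char) := pvKeywords.map String.toList

-- 'any(q.startswith(k, i) for i in range(len(q)+1) for k in kws)': position-major scan;
-- each recursion step is one position i (the current suffix), the inner any is the k-loop.
def pvScan (kws : List (List Char)) : List Char → Bool
  | [] => kws.any (fun k => PySem.Chars.startswith [] k)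
  | c :: rest =>
      kws.any (fun k => PySem.Chars.startswith (c :: rest) k) || pvScan kws rest

def is_structured_query_py_alt (query : String) : Bool :=
  let query_lower := PySem.Str.lower query
  pvScan pvKeywordChars query_lower.toList

-- ===== PRECONDITION & SPEC =====
def Spec_is_structured_query_py (query : String) (out : Bool) : Prop := out = is_structured_query_py_alt query
instance (query : String) (out : Bool) : Decidable (Spec_is_structured_query_py query out) := by unfold Spec_is_structured_query_py; infer_instance

-- ===== CLAIM (what is proved, stated in full; the proofs are below) =====
def Claim_equal_is_structured_query_py : Prop := ∀ (query : String), Dom_is_structured_query_py query → Spec_is_structured_query_py query (is_structured_query_py query)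

-- ===== LEMMAS AND PROOFS =====

theorem pvScan_iff (kws : List (List Char)) (s : List Char) :
    pvScan kws s = true ↔ ∃ k ∈ kws, PySem.Chars.isIn k s = true := by
  induction s with
  | nil =>
      simp only [pvScan, List.any_eq_true, PySem.Chars.startswith_iff,
        List.prefix_nil, PySem.Chars.isIn_iff_infix, List.infix_nil]
  | cons c rest ih =>
      simp only [pvScan, Bool.or_eq_true, ih, List.any_eq_true,
        PySem.Chars.startswith_iff]
      constructor
      · rintro (⟨k, hk, hpre⟩ | ⟨k, hk, hin⟩)
        · refine ⟨k, hk, ?_⟩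
          rw [← PySem.Chars.exists_prefix_drop_iff_isIn]
          exact ⟨0, by simpa using hpre⟩
        · refine ⟨k, hk, ?_⟩
          rw [← PySem.Chars.exists_prefix_drop_iff_isIn] at hin ⊢
          obtain ⟨j, hj⟩ := hin
          exact ⟨j + 1, by simpa using hj⟩
      · rintro ⟨k, hk, hin⟩
        rw [← PySem.Chars.exists_prefix_drop_iff_isIn] at hin
        obtain ⟨j, hj⟩ := hin
        cases j with
        | zero => exact Or.inl ⟨k, hk, by simpa using hj⟩
        | succ j =>
            refine Or.inr ⟨k, hk, ?_⟩
            rw [← PySem.Chars.exists_prefix_drop_iff_isIn]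
            exact ⟨j, by simpa using hj⟩

-- ===== VERDICT (by name: the statement is the Claim_ definition above) =====
theorem is_structured_query_py_spec : Claim_equal_is_structured_query_py := by
  intro query _
  show is_structured_query_py query = is_structured_query_py_alt query
  unfold is_structured_query_py is_structured_query_py_alt
  apply Bool.eq_iff_iff.mpr
  rw [pvScan_iff]
  simp only [List.any_eq_true, pvKeywordChars, List.mem_map]
  constructor
  · rintro ⟨k, hk, h⟩
    exact ⟨k.toList, ⟨k, hk, rfl⟩, by simpa [PySem.Str.isIn] using h⟩
  · rintro ⟨_, ⟨k, hk, rfl⟩, h⟩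
    exact ⟨k, hk, by simpa [PySem.Str.isIn] using h⟩
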